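-- pv_equiv track=rewrite | github.com/ysj1173886760/cs336 | cs336_basics/bpe_tokenizer.py | calc_candidiate_pair_by_occur_dict
-- ===== SOURCE A (Python) =====
-- def calc_candidiate_pair_by_occur_dict(occur_pair_dict):
--     candidate_pair = ()
--     candidate_freq = 0
--     for pair, freq in occur_pair_dict.items():
--         if freq > candidate_freq:
--             candidate_freq = freq
--             candidate_pair = pair
--         elif freq == candidate_freq and pair > candidate_pair:
--             candidate_pair = pair
--     return candidate_pair, candidate_freq
-- ===== SOURCE B (Python) =====
-- def calc_candidiate_pair_by_occur_dict(occur_pair_dict):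
--     max_freq = max(occur_pair_dict.values(), default=0)
--     candidates = [pair for pair, freq in occur_pair_dict.items() if freq == max_freq]
--     return max(candidates), max_freq
-- ===== Notes on version B (the rewrite author's own statement) =====
-- stated objective: alternative
-- what changed: Replaces A's one combined seeded argmax loop (tracking the best (pair,freq) pair with a two-branch update) by a staged find-max-then-filter decomposition: first compute max_freq = max(values, default=0), then build the list of pairs whose frequency equals max_freq, and return the largest such pair.
-- outside the precondition, e.g. on calc_candidiate_pair_by_occur_dict({}): A returns ((), 0), B raises ValueError; on calc_candidiate_pair_by_occur_dict({(1, 2): -5}): A returns ((), 0), B returns ((1, 2), -5)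
import Mathlib
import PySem

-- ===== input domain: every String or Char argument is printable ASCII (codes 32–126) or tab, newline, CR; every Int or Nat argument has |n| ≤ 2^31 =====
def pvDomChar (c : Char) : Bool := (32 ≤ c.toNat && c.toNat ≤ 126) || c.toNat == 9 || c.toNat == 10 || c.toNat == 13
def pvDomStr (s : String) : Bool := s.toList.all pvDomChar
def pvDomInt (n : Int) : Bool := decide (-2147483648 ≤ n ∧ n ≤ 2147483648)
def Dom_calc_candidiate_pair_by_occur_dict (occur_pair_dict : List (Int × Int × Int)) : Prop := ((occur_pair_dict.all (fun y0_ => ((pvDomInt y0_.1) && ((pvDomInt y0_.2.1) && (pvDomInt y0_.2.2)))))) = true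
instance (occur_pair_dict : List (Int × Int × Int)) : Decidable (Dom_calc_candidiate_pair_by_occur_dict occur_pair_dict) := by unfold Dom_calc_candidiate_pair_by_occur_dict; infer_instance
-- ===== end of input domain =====

-- B replaces A's single seeded argmax loop by a staged decomposition:
-- first max_freq = max(values, default=0), then the largest pair among those
-- with that frequency; equivalence holds on dicts with some frequency ≥ 0
-- (Pre_), where A's untypeable `()`/0 seed never wins.

-- ===== PORT A =====
-- Python's empty tuple `()` (A's initial candidate_pair) is modelled as `none`;
-- `pair > candidate_pair` with candidate_pair = () is always true in Python.
def pvPairGtOpt (p : Int × Int) (q : Option (Int × Int)) : Bool :=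
  match q with
  | none => true
  | some q => p.1 > q.1 || (p.1 == q.1 && p.2 > q.2)

def pvStepA (s : Option (Int × Int) × Int) (e : Int × Int × Int) : Option (Int × Int) × Int :=
  if e.2.2 > s.2 then (some (e.1, e.2.1), e.2.2)
  else if e.2.2 = s.2 ∧ pvPairGtOpt (e.1, e.2.1) s.1 = true then (some (e.1, e.2.1), s.2)
  else s

def calc_candidiate_pair_by_occur_dict (occur_pair_dict : List (Int × Int × Int)) : (Int × Int) × Int :=
  let s := occur_pair_dict.foldl pvStepA ((none : Option (Int × Int)), (0 : Int))
  -- outside Pre_ the Python A returns the untypeable ((), 0); (0,0) stands in for ()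
  (s.1.getD (0, 0), s.2)

-- ===== PORT B =====
-- max(occur_pair_dict.values(), default=0)
def pvMaxFreq (occur_pair_dict : List (Int × Int × Int)) : Int :=
  (PySem.List.max? (occur_pair_dict.map (fun e => e.2.2)) (fun y => y)).getD 0

-- Python's lexicographic `>` on int pairs
def pvPairMax (p q : Int × Int) : Int × Int :=
  if q.1 > p.1 || (q.1 == p.1 && q.2 > p.2) then q else p

-- [pair for pair, freq in items if freq == max_freq]
def pvCands (occur_pair_dict : List (Int × Int × Int)) : List (Int × Int) :=
  (occur_pair_dict.filter (fun e => e.2.2 == pvMaxFreq occur_pair_dict)).map (fun e => (e.1, e.2.1))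

-- max(candidates): Python raises ValueError on []; that case is outside Pre_
def pvBest (cands : List (Int × Int)) : Int × Int :=
  match cands with
  | [] => (0, 0)
  | c :: cs => cs.foldl pvPairMax c

def calc_candidiate_pair_by_occur_dict_alt (occur_pair_dict : List (Int × Int × Int)) : (Int × Int) × Int :=
  (pvBest (pvCands occur_pair_dict), pvMaxFreq occur_pair_dict)

-- ===== PRECONDITION & SPEC =====
-- Pre_ excludes the inputs (empty dict, or all frequencies negative) on which A
-- returns ((), 0): the empty tuple () is not a value of the declared pair type.
def Pre_calc_candidiate_pair_by_occur_dict (occur_pair_dict : List (Int × Int × Int)) : Prop :=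
  ∃ e ∈ occur_pair_dict, 0 ≤ e.2.2
instance (occur_pair_dict : List (Int × Int × Int)) : Decidable (Pre_calc_candidiate_pair_by_occur_dict occur_pair_dict) := by unfold Pre_calc_candidiate_pair_by_occur_dict; infer_instance

def pvWitness_calc_candidiate_pair_by_occur_dict : (List (Int × Int × Int)) := [(1, 2, 3)]

def Spec_calc_candidiate_pair_by_occur_dict (occur_pair_dict : List (Int × Int × Int)) (out : (Int × Int) × Int) : Prop := out = calc_candidiate_pair_by_occur_dict_alt occur_pair_dict
instance (occur_pair_dict : List (Int × Int × Int)) (out : (Int × Int) × Int) : Decidable (Spec_calc_candidiate_pair_by_occur_dict occur_pair_dict out) := by unfold Spec_calc_candidiate_pair_by_occur_dict; infer_instance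

-- ===== CLAIM (what is proved, stated in full; the proofs are below) =====
def Claim_equal_calc_candidiate_pair_by_occur_dict : Prop := ∀ (occur_pair_dict : List (Int × Int × Int)), Dom_calc_candidiate_pair_by_occur_dict occur_pair_dict → Pre_calc_candidiate_pair_by_occur_dict occur_pair_dict → Spec_calc_candidiate_pair_by_occur_dict occur_pair_dict (calc_candidiate_pair_by_occur_dict occur_pair_dict)

-- ===== LEMMAS AND PROOFS =====

-- pvMaxFreq on a nonempty list is the running max of the frequencies.
theorem pvMaxFreq_cons (x : Int × Int × Int) (t : List (Int × Int × Int)) :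
    pvMaxFreq (x :: t) = (t.map (fun e => e.2.2)).foldl max x.2.2 := by
  simp [pvMaxFreq, PySem.List.max?_id_cons]

theorem pvMaxFreq_append (ys : List (Int × Int × Int)) (e : Int × Int × Int) (h : ys ≠ []) :
    pvMaxFreq (ys ++ [e]) = max (pvMaxFreq ys) e.2.2 := by
  cases ys with
  | nil => exact absurd rfl h
  | cons y t =>
    rw [List.cons_append, pvMaxFreq_cons, pvMaxFreq_cons, List.map_append, List.foldl_append]
    rfl

-- If every frequency is negative, so is the max of a nonempty list.
theorem pvMaxFreq_neg (ys : List (Int × Int × Int)) (h : ys ≠ [])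
    (hall : ∀ x ∈ ys, x.2.2 < 0) : pvMaxFreq ys < 0 := by
  rcases hm : PySem.List.max? (ys.map (fun e => e.2.2)) (fun y => y) with _ | m
  · exact absurd (List.map_eq_nil_iff.mp ((PySem.List.max?_eq_none_iff _ _).mp hm)) h
  · have := PySem.List.max?_mem hm
    obtain ⟨x, hx, hxe⟩ := List.mem_map.mp this
    simp only [pvMaxFreq, hm, Option.getD_some]
    exact hxe ▸ hall x hx

-- Every frequency is at most pvMaxFreq (nonempty list).
theorem pvMaxFreq_isMax (ys : List (Int × Int × Int)) (x : Int × Int × Int) (hx : x ∈ ys) :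
    x.2.2 ≤ pvMaxFreq ys := by
  rcases hm : PySem.List.max? (ys.map (fun e => e.2.2)) (fun y => y) with _ | m
  · rw [(PySem.List.max?_eq_none_iff _ _).mp hm |> List.map_eq_nil_iff.mp] at hx
    simp at hx
  · have := PySem.List.max?_isMax hm x.2.2 (List.mem_map_of_mem hx)
    simp only [pvMaxFreq, hm, Option.getD_some]
    exact this

-- A's seed absorbs/skips an entry according to the sign of its frequency.
theorem pv_seed_take (h : Int × Int × Int) (hh : 0 ≤ h.2.2) :
    pvStepA ((none : Option (Int × Int)), (0 : Int)) h = (some (h.1, h.2.1), h.2.2) := by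
  simp only [pvStepA, pvPairGtOpt]
  rcases lt_or_eq_of_le hh with hf | hf
  · rw [if_pos hf]
  · rw [if_neg (by omega), if_pos ⟨hf.symm, trivial⟩, ← hf]

theorem pv_seed_skip (h : Int × Int × Int) (hh : h.2.2 < 0) :
    pvStepA ((none : Option (Int × Int)), (0 : Int)) h = ((none : Option (Int × Int)), (0 : Int)) := by
  simp only [pvStepA, pvPairGtOpt]
  rw [if_neg (by omega), if_neg (by intro hx; omega)]

-- A's loop stays at the seed while all frequencies are negative.
theorem pv_allneg (ys : List (Int × Int × Int)) (hall : ∀ x ∈ ys, x.2.2 < 0) :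
    ys.foldl pvStepA ((none : Option (Int × Int)), (0 : Int))
      = ((none : Option (Int × Int)), (0 : Int)) := by
  induction ys with
  | nil => rfl
  | cons y t ih =>
    rw [List.foldl_cons, pv_seed_skip y (hall y (by simp))]
    exact ih (fun x hx => hall x (by simp [hx]))

-- Main lemma: under Pre_, A's fold is B's (best candidate, max frequency).
theorem pv_main (xs : List (Int × Int × Int)) (hex : ∃ x ∈ xs, 0 ≤ x.2.2) :
    xs.foldl pvStepA ((none : Option (Int × Int)), (0 : Int))
      = (some (pvBest (pvCands xs)), pvMaxFreq xs) := by
  induction xs using List.reverseRecOn with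
  | nil => simp at hex
  | append_singleton ys e ih =>
    rw [List.foldl_append, List.foldl_cons, List.foldl_nil]
    by_cases hall : ∀ x ∈ ys, x.2.2 < 0
    · -- all of ys negative: the witness is e, and ys contributes nothing
      have he : 0 ≤ e.2.2 := by
        obtain ⟨x, hx, hxf⟩ := hex
        rcases List.mem_append.mp hx with h | h
        · exact absurd hxf (by simpa using hall x h)
        · simpa using (List.mem_singleton.mp h) ▸ hxf
      rw [pv_allneg ys hall, pv_seed_take e he]
      have hM : pvMaxFreq (ys ++ [e]) = e.2.2 := by
        cases hys : ys with
        | nil => simp [pvMaxFreq_cons]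
        | cons y t =>
          rw [← hys, pvMaxFreq_append ys e (by simp [hys])]
          have := pvMaxFreq_neg ys (by simp [hys]) hall
          omega
      have hcand : pvCands (ys ++ [e]) = [(e.1, e.2.1)] := by
        have hfil : (ys ++ [e]).filter (fun x => x.2.2 == pvMaxFreq (ys ++ [e])) = [e] := by
          rw [List.filter_append]
          have h1 : ys.filter (fun x => x.2.2 == pvMaxFreq (ys ++ [e])) = [] := by
            rw [List.filter_eq_nil_iff]
            intro x hx
            have := hall x hx
            simp only [hM, beq_iff_eq]
            omega
          have h2 : [e].filter (fun x => x.2.2 == pvMaxFreq (ys ++ [e])) = [e] := by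
            simp [hM]
          rw [h1, h2, List.nil_append]
        simp [pvCands, hfil]
      rw [hcand, hM]; rfl
    · -- Pre_ holds already for ys
      push Not at hall
      have hex' : ∃ x ∈ ys, 0 ≤ x.2.2 := by
        obtain ⟨x, hx, hxf⟩ := hall; exact ⟨x, hx, hxf⟩
      obtain ⟨w, hw, hwf⟩ := hex'
      have hys : ys ≠ [] := by intro h; subst h; simp at hw
      have hMys : 0 ≤ pvMaxFreq ys := le_trans hwf (pvMaxFreq_isMax ys w hw)
      rw [ih ⟨w, hw, hwf⟩]
      rw [pvMaxFreq_append ys e hys]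
      rcases lt_trichotomy (pvMaxFreq ys) e.2.2 with hlt | heq | hgt
      · -- e strictly wins: candidates collapse to [e.pair]
        have hM : max (pvMaxFreq ys) e.2.2 = e.2.2 := by omega
        have hcand : pvCands (ys ++ [e]) = [(e.1, e.2.1)] := by
          have hfil : (ys ++ [e]).filter (fun x => x.2.2 == pvMaxFreq (ys ++ [e])) = [e] := by
            rw [List.filter_append]
            have hMe : pvMaxFreq (ys ++ [e]) = e.2.2 := by
              rw [pvMaxFreq_append ys e hys]; omega
            have h1 : ys.filter (fun x => x.2.2 == pvMaxFreq (ys ++ [e])) = [] := by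
              rw [List.filter_eq_nil_iff]
              intro x hx
              have := pvMaxFreq_isMax ys x hx
              simp only [hMe, beq_iff_eq]
              omega
            have h2 : [e].filter (fun x => x.2.2 == pvMaxFreq (ys ++ [e])) = [e] := by
              simp [hMe]
            rw [h1, h2, List.nil_append]
          simp [pvCands, hfil]
        rw [hcand, hM]
        simp only [pvStepA, if_pos hlt]
        rfl
      · -- frequency tie: the new candidate list is the old one plus e.pair
        have hM : max (pvMaxFreq ys) e.2.2 = pvMaxFreq ys := by omega
        have hMe : pvMaxFreq (ys ++ [e]) = pvMaxFreq ys := by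
          rw [pvMaxFreq_append ys e hys]; omega
        have hcand : pvCands (ys ++ [e]) = pvCands ys ++ [(e.1, e.2.1)] := by
          simp only [pvCands, List.filter_append, List.map_append, hMe]
          congr 1
          simp [heq]
        rw [hcand, hM]
        -- the A-step ties and compares pairs; pvBest appends one pvPairMax step
        rcases hc : pvCands ys with _ | ⟨c, cs⟩
        · -- impossible: the max frequency is attained in ys
          exfalso
          rcases hm : PySem.List.max? (ys.map (fun x => x.2.2)) (fun y => y) with _ | m
          · exact hys (List.map_eq_nil_iff.mp ((PySem.List.max?_eq_none_iff _ _).mp hm))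
          · obtain ⟨x, hx, hxe⟩ := List.mem_map.mp (PySem.List.max?_mem hm)
            have hxM : x.2.2 = pvMaxFreq ys := by simp [pvMaxFreq, hm, hxe]
            have : x ∈ ys.filter (fun x => x.2.2 == pvMaxFreq ys) :=
              List.mem_filter.mpr ⟨hx, by simp [hxM]⟩
            have : (x.1, x.2.1) ∈ pvCands ys := List.mem_map_of_mem this
            rw [hc] at this; simp at this
        · have hfold : pvBest (c :: (cs ++ [(e.1, e.2.1)]))
              = pvPairMax (cs.foldl pvPairMax c) (e.1, e.2.1) := by
            simp [pvBest, List.foldl_append]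
          rw [show ((c :: cs) ++ [(e.1, e.2.1)]) = c :: (cs ++ [(e.1, e.2.1)]) from rfl, hfold]
          simp only [pvBest, pvStepA, pvPairGtOpt, pvPairMax]
          rw [if_neg (by omega)]
          by_cases hgtp : (e.1 > (List.foldl pvPairMax c cs).1
              || (e.1 == (List.foldl pvPairMax c cs).1 && e.2.1 > (List.foldl pvPairMax c cs).2)) = true
          · rw [if_pos ⟨by omega, hgtp⟩, if_pos hgtp]
          · rw [if_neg (by intro hx; exact hgtp hx.2), if_neg hgtp]
      · -- e loses: nothing changes
        have hM : max (pvMaxFreq ys) e.2.2 = pvMaxFreq ys := by omega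
        have hMe : pvMaxFreq (ys ++ [e]) = pvMaxFreq ys := by
          rw [pvMaxFreq_append ys e hys]; omega
        have hcand : pvCands (ys ++ [e]) = pvCands ys := by
          simp only [pvCands, List.filter_append, List.map_append, hMe]
          have : [e].filter (fun x => x.2.2 == pvMaxFreq ys) = [] := by
            simp; omega
          simp [this]
        rw [hcand, hM]
        simp only [pvStepA, pvPairGtOpt]
        rw [if_neg (by omega), if_neg (by intro hx; omega)]

-- ===== VERDICT (by name: the statement is the Claim_ definition above) =====
theorem calc_candidiate_pair_by_occur_dict_spec : Claim_equal_calc_candidiate_pair_by_occur_dict := by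
  intro l _ hpre
  unfold Spec_calc_candidiate_pair_by_occur_dict
  unfold calc_candidiate_pair_by_occur_dict calc_candidiate_pair_by_occur_dict_alt
  rw [pv_main l hpre]
  rfl
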